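-- pv_equiv track=rewrite | github.com/TomaszBucko/Grafik | sprawdzaniegrafiku v2.py | ciagniedziel
-- ===== SOURCE A (Python) =====
-- def ciagniedziel(lista, pierwszaniedziela):
--     najwiecej = 0
--     pomoc = 0
--     dzien = 1
--     for i in lista:
--         if (dzien - pierwszaniedziela) % 7 == 0:
--             if i != 0:
--                 pomoc += 1
--             else:
--                 if pomoc > najwiecej:
--                     najwiecej = pomoc
--                 pomoc = 0
--         dzien += 1
--     if pomoc > najwiecej:
--         najwiecej = pomoc
--     return najwiecej
-- ===== SOURCE B (Python) =====
-- def ciagniedziel(lista, pierwszaniedziela):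
--     sundays = [v for idx, v in enumerate(lista)
--                if (idx + 1 - pierwszaniedziela) % 7 == 0]
--     zeros = [-1] + [i for i, v in enumerate(sundays) if v == 0] + [len(sundays)]
--     return max(b - a - 1 for a, b in zip(zeros, zeros[1:]))
-- ===== Notes on version B (the rewrite author's own statement) =====
-- stated objective: alternative
-- what changed: Instead of A's single pass with a running/best run counter, B extracts the Sunday-position values, records the indices of the zeros among them (with sentinels -1 and len), and returns the maximum gap between consecutive zero positions minus one.
import Mathlib
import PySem

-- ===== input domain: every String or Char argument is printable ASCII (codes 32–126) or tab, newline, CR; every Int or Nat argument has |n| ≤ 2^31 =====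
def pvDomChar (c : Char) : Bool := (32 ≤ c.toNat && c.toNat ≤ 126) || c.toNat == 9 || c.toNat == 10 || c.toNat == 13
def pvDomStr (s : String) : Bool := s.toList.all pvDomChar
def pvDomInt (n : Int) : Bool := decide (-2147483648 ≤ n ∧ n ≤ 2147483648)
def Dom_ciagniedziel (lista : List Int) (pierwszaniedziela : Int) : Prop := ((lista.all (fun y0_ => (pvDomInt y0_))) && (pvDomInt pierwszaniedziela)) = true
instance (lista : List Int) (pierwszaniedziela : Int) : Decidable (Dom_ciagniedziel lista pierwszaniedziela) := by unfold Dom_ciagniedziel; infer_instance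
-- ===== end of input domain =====

-- B replaces A's running/best run counter by zero-position arithmetic: it lists the indices of
-- zeros among the Sunday-position values (sentinels -1 and len) and returns the maximum gap
-- between consecutive zero positions minus one (alternative decomposition, same cost).

-- ===== PORT A =====
-- loop body of A's for-loop: state (najwiecej, pomoc, dzien)
def pvStepA (pierwszaniedziela : Int) (s : Int × Int × Int) (i : Int) : Int × Int × Int :=
  if PySem.Int.mod (s.2.2 - pierwszaniedziela) 7 == 0 then
    if i != 0 then (s.1, s.2.1 + 1, s.2.2 + 1)
    else ((if s.2.1 > s.1 then s.2.1 else s.1), 0, s.2.2 + 1)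
  else (s.1, s.2.1, s.2.2 + 1)

def ciagniedziel (lista : List Int) (pierwszaniedziela : Int) : Int :=
  let r := lista.foldl (pvStepA pierwszaniedziela) (0, 0, 1)
  if r.2.1 > r.1 then r.2.1 else r.1

-- ===== PORT B =====
-- Python's max(iterable) over a nonempty iterable (raises on []; unreachable here since
-- the zeros list always has at least two elements)
def pvPyMax : List Int → Int
  | [] => 0
  | g :: gs => gs.foldl max g

def ciagniedziel_alt (lista : List Int) (pierwszaniedziela : Int) : Int :=
  let sundays := ((PySem.List.enumerate lista 0).filter
      (fun q => PySem.Int.mod (q.1 + 1 - pierwszaniedziela) 7 == 0)).map (·.2)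
  let zeros : List Int :=
    (-1) :: (((PySem.List.enumerate sundays 0).filter (fun q => q.2 == 0)).map (·.1)
      ++ [(sundays.length : Int)])
  pvPyMax ((zeros.zip zeros.tail).map (fun q => q.2 - q.1 - 1))

-- ===== PRECONDITION & SPEC =====
def Spec_ciagniedziel (lista : List Int) (pierwszaniedziela : Int) (out : Int) : Prop := out = ciagniedziel_alt lista pierwszaniedziela
instance (lista : List Int) (pierwszaniedziela : Int) (out : Int) : Decidable (Spec_ciagniedziel lista pierwszaniedziela out) := by unfold Spec_ciagniedziel; infer_instance

-- ===== CLAIM (what is proved, stated in full; the proofs are below) =====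
def Claim_equal_ciagniedziel : Prop := ∀ (lista : List Int) (pierwszaniedziela : Int), Dom_ciagniedziel lista pierwszaniedziela → Spec_ciagniedziel lista pierwszaniedziela (ciagniedziel lista pierwszaniedziela)

-- ===== LEMMAS AND PROOFS =====

-- the Sunday-position values of xs when the first element is day d
def pvSf (p : Int) : List Int → Int → List Int
  | [], _ => []
  | x :: xs, d =>
    if (d - p) % 7 == 0 then x :: pvSf p xs (d + 1) else pvSf p xs (d + 1)

-- longest run of nonzeros, given a current running count pom (A's inner behaviour)
def pvG : Int → List Int → Int
  | pom, [] => pom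
  | pom, x :: xs => if x != 0 then pvG (pom + 1) xs else max pom (pvG 0 xs)

-- positions of zeros in a list, first element at index i
def pvZf : List Int → Int → List Int
  | [], _ => []
  | x :: xs, i => if x == 0 then i :: pvZf xs (i + 1) else pvZf xs (i + 1)

-- max gap between consecutive zero positions (prev = previous zero, e = end sentinel)
def pvMG : Int → List Int → Int → Int
  | prev, [], e => e - prev - 1
  | prev, z :: zs, e => max (z - prev - 1) (pvMG z zs e)

theorem pvA_fold (p : Int) (xs : List Int) :
    ∀ naj pom d,
      (let r := xs.foldl (pvStepA p) (naj, pom, d);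
       if r.2.1 > r.1 then r.2.1 else r.1) = max naj (pvG pom (pvSf p xs d)) := by
  induction xs with
  | nil => intro naj pom d; simp [pvSf, pvG]; omega
  | cons x xs ih =>
    intro naj pom d
    simp only [List.foldl_cons, pvStepA, pvSf]
    by_cases hc : (7:Int) ∣ (d - p)
    · by_cases hx : x = 0
      · simp [hc, hx, ih, pvG]
        split_ifs <;> omega
      · simp [hc, hx, ih, pvG]
    · simp [hc, ih]

theorem pvSundays_eq (p : Int) (xs : List Int) :
    ∀ s : Int,
      ((PySem.List.enumerate xs s).filter
        (fun q => (q.1 + 1 - p) % 7 == 0)).map (·.2) = pvSf p xs (s + 1) := by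
  induction xs with
  | nil => intro s; simp [PySem.List.enumerate_nil, pvSf]
  | cons x xs ih =>
    intro s
    rw [PySem.List.enumerate_cons]
    by_cases hc : (7:Int) ∣ (s + 1 - p)
    · simp only [List.filter_cons]
      simp [hc, pvSf, ih, add_assoc]
    · simp only [List.filter_cons]
      simp [hc, pvSf, ih, add_assoc]

theorem pvZeros_eq (xs : List Int) :
    ∀ i : Int,
      ((PySem.List.enumerate xs i).filter (fun q => q.2 == 0)).map (·.1) = pvZf xs i := by
  induction xs with
  | nil => intro i; simp [PySem.List.enumerate_nil, pvZf]
  | cons x xs ih =>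
    intro i
    rw [PySem.List.enumerate_cons]
    by_cases hx : x = 0 <;> simp [hx, pvZf, ih]

-- A's run counter equals the max-gap computation over zero positions
theorem pvG_eq_MG (s : List Int) :
    ∀ i pom : Int, pvG pom s = pvMG (i - pom - 1) (pvZf s i) (i + s.length) := by
  induction s with
  | nil => intro i pom; simp [pvG, pvZf, pvMG]; omega
  | cons x xs ih =>
    intro i pom
    by_cases hx : x = 0
    · have h1 : pvG pom (x :: xs) = max pom (pvG 0 xs) := by simp [pvG, hx]
      have h2 : pvZf (x :: xs) i = i :: pvZf xs (i + 1) := by simp [pvZf, hx]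
      rw [h1, h2]
      simp only [pvMG, List.length_cons]
      rw [show i - (i - pom - 1) - 1 = pom from by ring]
      rw [ih (i + 1) 0]
      rw [show i + 1 - 0 - 1 = i from by ring]
      congr 1
      congr 1
      push_cast; ring
    · have h1 : pvG pom (x :: xs) = pvG (pom + 1) xs := by simp [pvG, hx]
      have h2 : pvZf (x :: xs) i = pvZf xs (i + 1) := by simp [pvZf, hx]
      rw [h1, h2, ih (i + 1) (pom + 1)]
      rw [show i + 1 - (pom + 1) - 1 = i - pom - 1 from by ring]
      simp only [List.length_cons]
      congr 1
      push_cast; ring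

theorem pvG_ge (s : List Int) : ∀ pom : Int, pom ≤ pvG pom s := by
  induction s with
  | nil => intro pom; simp [pvG]
  | cons x xs ih =>
    intro pom
    by_cases hx : x = 0
    · simp [pvG, hx]
    · have h1 : pvG pom (x :: xs) = pvG (pom + 1) xs := by simp [pvG, hx]
      rw [h1]
      exact le_trans (by omega) (ih (pom + 1))

theorem pvFoldMax (t : List Int) : ∀ a b : Int, t.foldl max (max a b) = max a (t.foldl max b) := by
  induction t with
  | nil => intro a b; simp
  | cons c t ih =>
    intro a b
    simp only [List.foldl_cons]
    rw [max_assoc, ih]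

-- the gap fold over (prev :: zs ++ [e]) computes pvMG prev zs e
theorem pvGaps_eq (zs : List Int) :
    ∀ prev e : Int,
      pvPyMax ((((prev :: (zs ++ [e])).zip (zs ++ [e])).map (fun q => q.2 - q.1 - 1)))
        = pvMG prev zs e := by
  induction zs with
  | nil => intro prev e; simp [pvPyMax, pvMG]
  | cons z zs ih =>
    intro prev e
    have ht : ((z :: (zs ++ [e])).zip (zs ++ [e])).map (fun q : Int × Int => q.2 - q.1 - 1) ≠ [] := by
      cases zs <;> simp
    simp only [List.cons_append, List.zip_cons_cons, List.map_cons]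
    cases hg : ((z :: (zs ++ [e])).zip (zs ++ [e])).map (fun q : Int × Int => q.2 - q.1 - 1) with
    | nil => exact absurd hg ht
    | cons g gs =>
      have hrec := ih z e
      simp only [hg] at hrec
      simp only [pvPyMax, List.foldl_cons, pvMG, ← hrec]
      simp only [pvPyMax] at hrec ⊢
      rw [pvFoldMax]

theorem ciagniedziel_eq (lista : List Int) (p : Int) :
    ciagniedziel lista p = ciagniedziel_alt lista p := by
  simp only [ciagniedziel, ciagniedziel_alt, List.tail_cons]
  rw [pvA_fold p lista 0 0 1]
  have hm : ∀ a : Int, PySem.Int.mod a 7 = a % 7 :=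
    fun a => PySem.Int.mod_eq_emod_of_pos (by norm_num)
  simp only [hm]
  rw [pvSundays_eq p lista 0, pvZeros_eq (pvSf p lista (0 + 1)) 0,
    pvGaps_eq (pvZf (pvSf p lista (0 + 1)) 0) (-1) (((pvSf p lista (0 + 1)).length : Int))]
  norm_num
  rw [max_eq_right (pvG_ge (pvSf p lista 1) 0), pvG_eq_MG (pvSf p lista 1) 0 0]
  norm_num

-- ===== VERDICT (by name: the statement is the Claim_ definition above) =====
theorem ciagniedziel_spec : Claim_equal_ciagniedziel := by
  intro lista p _
  exact ciagniedziel_eq lista p
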